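-- pv_equiv track=rewrite | github.com/romain-gilliotte/spectral | cli/helpers/schemas.py | _schemas_structurally_similar
-- ===== SOURCE A (Python) =====
-- from typing import Any, cast
--
-- def _schemas_structurally_similar(value_dicts: list[dict[str, Any]]) -> bool:
--     """Return True when all *value_dicts* are objects with >50% property overlap.
--
--     Each element must be a ``dict`` with at least one key.  Overlap is measured
--     via the Jaccard index: ``|intersection| / |union|`` of the property-name
--     sets across all dicts.
--     """
--     if not value_dicts:
--         return False
--     sets = [set(d.keys()) for d in value_dicts]
--     intersection = sets[0]
--     union = sets[0]
--     for s in sets[1:]: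
--         intersection = intersection & s
--         union = union | s
--     if not union:
--         return False
--     return len(intersection) / len(union) > 0.5
-- ===== SOURCE B (Python) =====
-- def _schemas_structurally_similar(value_dicts):
--     """Single pass over all keys with a frequency table instead of building
--     and repeatedly intersecting/unioning key sets."""
--     if not value_dicts:
--         return False
--     counts = {}
--     for d in value_dicts:
--         for k in d:
--             counts[k] = counts.get(k, 0) + 1
--     if not counts:
--         return False
--     n = len(value_dicts)
--     intersection = sum(1 for c in counts.values() if c == n)
--     return 2 * intersection > len(counts)
-- ===== Notes on version B (the rewrite author's own statement) =====
-- stated objective: simpler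
-- what changed: Replaced the list of key-sets with repeated set intersection/union by a single frequency table keyed by property name: the union size is the table size and the intersection size is the number of keys whose count equals len(value_dicts), compared via the integer test 2*intersection > union.
import Mathlib
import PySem

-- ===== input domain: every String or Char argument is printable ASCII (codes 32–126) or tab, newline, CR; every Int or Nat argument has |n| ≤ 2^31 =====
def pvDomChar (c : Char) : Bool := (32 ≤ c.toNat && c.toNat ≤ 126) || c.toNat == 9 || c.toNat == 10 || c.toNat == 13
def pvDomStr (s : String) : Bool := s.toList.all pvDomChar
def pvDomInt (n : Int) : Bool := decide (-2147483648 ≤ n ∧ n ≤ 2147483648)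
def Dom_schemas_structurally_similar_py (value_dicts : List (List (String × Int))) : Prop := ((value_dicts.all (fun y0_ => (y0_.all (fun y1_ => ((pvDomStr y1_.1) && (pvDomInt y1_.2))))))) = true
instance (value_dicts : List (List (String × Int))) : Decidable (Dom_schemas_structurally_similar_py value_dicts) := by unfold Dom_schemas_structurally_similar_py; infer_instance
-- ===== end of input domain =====

-- B replaces A's list of key-sets and repeated set intersection/union by one frequency
-- table of key -> number of dicts containing it (simpler single pass, same result).

-- ===== PORT A =====
-- the float test len(inter)/len(union) > 0.5 is ported as the exact integer test
-- 2*|inter| > |union| (equal for these operand sizes)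
def schemas_structurally_similar_py (value_dicts : List (List (String × Int))) : Bool :=
  if value_dicts.isEmpty then false
  else
    let sets : List (PySem.Set String) :=
      value_dicts.map (fun d => PySem.Set.ofList (d.map Prod.fst))
    let s0 := sets.headD []
    let r := (sets.drop 1).foldl
      (fun (p : PySem.Set String × PySem.Set String) s =>
        (PySem.Set.inter p.1 s, PySem.Set.union p.2 s)) (s0, s0)
    if r.2.isEmpty then false
    else decide (2 * r.1.length > r.2.length)

-- ===== PORT B =====
def schemas_structurally_similar_py_alt (value_dicts : List (List (String × Int))) : Bool :=
  if value_dicts.isEmpty then false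
  else
    let counts : PySem.Dict String Int :=
      value_dicts.foldl
        (fun c d =>
          (PySem.Set.ofList (d.map Prod.fst)).foldl
            (fun c k => c.insert k (c.getD k 0 + 1)) c)
        PySem.Dict.empty
    if counts.size = 0 then false
    else
      let n : Int := (value_dicts.length : Int)
      let inter : Int := counts.values.foldl (fun acc c => if c = n then acc + 1 else acc) 0
      decide (2 * inter > (counts.size : Int))

-- ===== PRECONDITION & SPEC =====
def Spec_schemas_structurally_similar_py (value_dicts : List (List (String × Int))) (out : Bool) : Prop := out = schemas_structurally_similar_py_alt value_dicts
instance (value_dicts : List (List (String × Int))) (out : Bool) : Decidable (Spec_schemas_structurally_similar_py value_dicts out) := by unfold Spec_schemas_structurally_similar_py; infer_instance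

-- ===== CLAIM (what is proved, stated in full; the proofs are below) =====
def Claim_equal_schemas_structurally_similar_py : Prop := ∀ (value_dicts : List (List (String × Int))), Dom_schemas_structurally_similar_py value_dicts → Spec_schemas_structurally_similar_py value_dicts (schemas_structurally_similar_py value_dicts)

-- ===== LEMMAS AND PROOFS =====

theorem schemas_pair_fold (l : List (PySem.Set String)) (a b : PySem.Set String) :
    l.foldl (fun (p : PySem.Set String × PySem.Set String) s =>
      (PySem.Set.inter p.1 s, PySem.Set.union p.2 s)) (a, b)
      = (l.foldl PySem.Set.inter a, l.foldl PySem.Set.union b) := by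
  induction l generalizing a b with
  | nil => rfl
  | cons s l ih => simp [List.foldl, ih]

theorem schemas_mem_fold_inter (l : List (PySem.Set String)) (a : PySem.Set String) (x : String) :
    x ∈ l.foldl PySem.Set.inter a ↔ x ∈ a ∧ ∀ s ∈ l, x ∈ s := by
  induction l generalizing a with
  | nil => simp
  | cons s l ih => simp [List.foldl, ih, PySem.Set.mem_inter]; tauto

theorem schemas_mem_fold_union (l : List (PySem.Set String)) (a : PySem.Set String) (x : String) :
    x ∈ l.foldl PySem.Set.union a ↔ x ∈ a ∨ ∃ s ∈ l, x ∈ s := by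
  induction l generalizing a with
  | nil => simp
  | cons s l ih => simp [List.foldl, ih, PySem.Set.mem_union]; tauto

theorem schemas_nodup_fold_inter (l : List (PySem.Set String)) (a : PySem.Set String)
    (h : a.Nodup) : (l.foldl PySem.Set.inter a).Nodup := by
  induction l generalizing a with
  | nil => exact h
  | cons s l ih => exact ih _ (PySem.Set.nodup_inter _ _ h)

theorem schemas_nodup_fold_union (l : List (PySem.Set String)) (a : PySem.Set String)
    (h : a.Nodup) : (l.foldl PySem.Set.union a).Nodup := by
  induction l generalizing a with
  | nil => exact h
  | cons s l ih => exact ih _ (PySem.Set.nodup_union _ _ h)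

-- the B-side accumulator loop
theorem schemas_counts_keys_mem (l : List (List (String × Int))) (c : PySem.Dict String Int)
    (k : String) :
    k ∈ (l.foldl
        (fun c d => (PySem.Set.ofList (d.map Prod.fst)).foldl
          (fun c k => c.insert k (c.getD k 0 + 1)) c) c).keys
      ↔ k ∈ c.keys ∨ ∃ d ∈ l, k ∈ PySem.Set.ofList (d.map Prod.fst) := by
  induction l generalizing c with
  | nil => simp
  | cons d l ih =>
      simp only [List.foldl, ih, PySem.Dict.keys_foldl_insert, PySem.Set.mem_update,
        List.exists_mem_cons_iff]
      tauto

theorem schemas_counts_keys_nodup (l : List (List (String × Int))) (c : PySem.Dict String Int)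
    (h : c.keys.Nodup) :
    (l.foldl
        (fun c d => (PySem.Set.ofList (d.map Prod.fst)).foldl
          (fun c k => c.insert k (c.getD k 0 + 1)) c) c).keys.Nodup := by
  induction l generalizing c with
  | nil => exact h
  | cons d l ih =>
      refine ih _ ?_
      rw [PySem.Dict.keys_foldl_insert]
      exact PySem.Set.nodup_update _ _ h

theorem schemas_counts_getD (l : List (List (String × Int))) (c : PySem.Dict String Int)
    (k : String) :
    (l.foldl
        (fun c d => (PySem.Set.ofList (d.map Prod.fst)).foldl
          (fun c k => c.insert k (c.getD k 0 + 1)) c) c).getD k 0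
      = c.getD k 0 + (l.countP (fun d => decide (k ∈ PySem.Set.ofList (d.map Prod.fst))) : Int) := by
  induction l generalizing c with
  | nil => simp
  | cons d l ih =>
      simp only [List.foldl, ih, PySem.Dict.getD_foldl_insert_add_one, List.countP_cons]
      by_cases hk : k ∈ PySem.Set.ofList (d.map Prod.fst)
      · rw [List.count_eq_one_of_mem (PySem.Set.nodup_ofList _) hk]
        simp [hk]
        ring
      · rw [List.count_eq_zero_of_not_mem hk]
        simp [hk]

theorem schemas_countP_fold (l : List Int) (n acc : Int) :
    l.foldl (fun acc c => if c = n then acc + 1 else acc) acc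
      = acc + (l.countP (fun c => decide (c = n)) : Int) := by
  induction l generalizing acc with
  | nil => simp
  | cons c l ih =>
      simp only [List.foldl, ih, List.countP_cons]
      by_cases h : c = n
      · simp [h]
        ring
      · simp [h]

theorem schemas_portA_cons (v : List (String × Int)) (tl : List (List (String × Int))) :
    schemas_structurally_similar_py (v :: tl) =
      (if (List.foldl (fun (p : PySem.Set String × PySem.Set String) s => (PySem.Set.inter p.1 s, PySem.Set.union p.2 s)) (PySem.Set.ofList (List.map Prod.fst v), PySem.Set.ofList (List.map Prod.fst v)) (List.map (fun d => PySem.Set.ofList (List.map Prod.fst d)) tl)).2.isEmpty then false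
       else decide (2 * (List.foldl (fun (p : PySem.Set String × PySem.Set String) s => (PySem.Set.inter p.1 s, PySem.Set.union p.2 s)) (PySem.Set.ofList (List.map Prod.fst v), PySem.Set.ofList (List.map Prod.fst v)) (List.map (fun d => PySem.Set.ofList (List.map Prod.fst d)) tl)).1.length > (List.foldl (fun (p : PySem.Set String × PySem.Set String) s => (PySem.Set.inter p.1 s, PySem.Set.union p.2 s)) (PySem.Set.ofList (List.map Prod.fst v), PySem.Set.ofList (List.map Prod.fst v)) (List.map (fun d => PySem.Set.ofList (List.map Prod.fst d)) tl)).2.length)) := rfl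

theorem schemas_portB_cons (v : List (String × Int)) (tl : List (List (String × Int))) :
    schemas_structurally_similar_py_alt (v :: tl) =
      (if (List.foldl (fun c d => (PySem.Set.ofList (List.map Prod.fst d)).foldl (fun c k => c.insert k (c.getD k 0 + 1)) c) (PySem.Dict.empty : PySem.Dict String Int) (v :: tl)).size = 0 then false
       else decide (2 * ((List.foldl (fun c d => (PySem.Set.ofList (List.map Prod.fst d)).foldl (fun c k => c.insert k (c.getD k 0 + 1)) c) (PySem.Dict.empty : PySem.Dict String Int) (v :: tl)).values.foldl
            (fun acc c => if c = ((v :: tl).length : Int) then acc + 1 else acc) 0)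
          > ((List.foldl (fun c d => (PySem.Set.ofList (List.map Prod.fst d)).foldl (fun c k => c.insert k (c.getD k 0 + 1)) c) (PySem.Dict.empty : PySem.Dict String Int) (v :: tl)).size : Int))) := rfl

theorem schemas_cons_eq (v : List (String × Int)) (tl : List (List (String × Int))) :
    schemas_structurally_similar_py (v :: tl) = schemas_structurally_similar_py_alt (v :: tl) := by
  rw [schemas_portA_cons, schemas_portB_cons, schemas_pair_fold]
  dsimp only
  have hUN : (List.foldl (fun c d => (PySem.Set.ofList (List.map Prod.fst d)).foldl (fun c k => c.insert k (c.getD k 0 + 1)) c) (PySem.Dict.empty : PySem.Dict String Int) (v :: tl)).keys.Nodup := schemas_counts_keys_nodup _ _ (by simp)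
  have hAuN : (List.foldl PySem.Set.union (PySem.Set.ofList (List.map Prod.fst v)) (List.map (fun d => PySem.Set.ofList (List.map Prod.fst d)) tl)).Nodup := schemas_nodup_fold_union _ _ (PySem.Set.nodup_ofList _)
  have hAiN : (List.foldl PySem.Set.inter (PySem.Set.ofList (List.map Prod.fst v)) (List.map (fun d => PySem.Set.ofList (List.map Prod.fst d)) tl)).Nodup := schemas_nodup_fold_inter _ _ (PySem.Set.nodup_ofList _)
  have hmemU : ∀ x, x ∈ (List.foldl (fun c d => (PySem.Set.ofList (List.map Prod.fst d)).foldl (fun c k => c.insert k (c.getD k 0 + 1)) c) (PySem.Dict.empty : PySem.Dict String Int) (v :: tl)).keys ↔ ∃ d ∈ v :: tl, x ∈ PySem.Set.ofList (List.map Prod.fst d) := by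
    intro x
    rw [schemas_counts_keys_mem]
    simp
  have hmemAu : ∀ x, x ∈ (List.foldl PySem.Set.union (PySem.Set.ofList (List.map Prod.fst v)) (List.map (fun d => PySem.Set.ofList (List.map Prod.fst d)) tl)) ↔ ∃ d ∈ v :: tl, x ∈ PySem.Set.ofList (List.map Prod.fst d) := by
    intro x
    rw [schemas_mem_fold_union]
    simp
  have hlen : (List.foldl PySem.Set.union (PySem.Set.ofList (List.map Prod.fst v)) (List.map (fun d => PySem.Set.ofList (List.map Prod.fst d)) tl)).length = (List.foldl (fun c d => (PySem.Set.ofList (List.map Prod.fst d)).foldl (fun c k => c.insert k (c.getD k 0 + 1)) c) (PySem.Dict.empty : PySem.Dict String Int) (v :: tl)).keys.length :=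
    ((List.perm_ext_iff_of_nodup hAuN hUN).2 (fun x => (hmemAu x).trans (hmemU x).symm)).length_eq
  have hsize : (List.foldl (fun c d => (PySem.Set.ofList (List.map Prod.fst d)).foldl (fun c k => c.insert k (c.getD k 0 + 1)) c) (PySem.Dict.empty : PySem.Dict String Int) (v :: tl)).size = (List.foldl (fun c d => (PySem.Set.ofList (List.map Prod.fst d)).foldl (fun c k => c.insert k (c.getD k 0 + 1)) c) (PySem.Dict.empty : PySem.Dict String Int) (v :: tl)).keys.length := by
    simp [PySem.Dict.size, PySem.Dict.keys]
  have hgetD : ∀ k, (List.foldl (fun c d => (PySem.Set.ofList (List.map Prod.fst d)).foldl (fun c k => c.insert k (c.getD k 0 + 1)) c) (PySem.Dict.empty : PySem.Dict String Int) (v :: tl)).getD k 0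
      = ((v :: tl).countP (fun d => decide (k ∈ PySem.Set.ofList (List.map Prod.fst d))) : Int) := by
    intro k
    rw [schemas_counts_getD]
    simp
  have hmemAi : ∀ x, x ∈ (List.foldl PySem.Set.inter (PySem.Set.ofList (List.map Prod.fst v)) (List.map (fun d => PySem.Set.ofList (List.map Prod.fst d)) tl)) ↔ ∀ d ∈ v :: tl, x ∈ PySem.Set.ofList (List.map Prod.fst d) := by
    intro x
    rw [schemas_mem_fold_inter]
    simp
  have hBfmem : ∀ x, x ∈ (List.filter (fun k => decide (∀ d ∈ v :: tl, k ∈ PySem.Set.ofList (List.map Prod.fst d))) (List.foldl (fun c d => (PySem.Set.ofList (List.map Prod.fst d)).foldl (fun c k => c.insert k (c.getD k 0 + 1)) c) (PySem.Dict.empty : PySem.Dict String Int) (v :: tl)).keys) ↔ ∀ d ∈ v :: tl, x ∈ PySem.Set.ofList (List.map Prod.fst d) := by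
    intro x
    simp only [List.mem_filter, decide_eq_true_eq]
    constructor
    · exact fun h => h.2
    · intro h
      exact ⟨(hmemU x).2 ⟨v, by simp, h v (by simp)⟩, h⟩
  have hlenI : (List.foldl PySem.Set.inter (PySem.Set.ofList (List.map Prod.fst v)) (List.map (fun d => PySem.Set.ofList (List.map Prod.fst d)) tl)).length = (List.filter (fun k => decide (∀ d ∈ v :: tl, k ∈ PySem.Set.ofList (List.map Prod.fst d))) (List.foldl (fun c d => (PySem.Set.ofList (List.map Prod.fst d)).foldl (fun c k => c.insert k (c.getD k 0 + 1)) c) (PySem.Dict.empty : PySem.Dict String Int) (v :: tl)).keys).length :=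
    ((List.perm_ext_iff_of_nodup hAiN (hUN.filter _)).2
      (fun x => (hmemAi x).trans (hBfmem x).symm)).length_eq
  have hinterB : (List.foldl (fun c d => (PySem.Set.ofList (List.map Prod.fst d)).foldl (fun c k => c.insert k (c.getD k 0 + 1)) c) (PySem.Dict.empty : PySem.Dict String Int) (v :: tl)).values.foldl
        (fun acc c => if c = ((v :: tl).length : Int) then acc + 1 else acc) 0
      = ((List.filter (fun k => decide (∀ d ∈ v :: tl, k ∈ PySem.Set.ofList (List.map Prod.fst d))) (List.foldl (fun c d => (PySem.Set.ofList (List.map Prod.fst d)).foldl (fun c k => c.insert k (c.getD k 0 + 1)) c) (PySem.Dict.empty : PySem.Dict String Int) (v :: tl)).keys).length : Int) := by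
    rw [schemas_countP_fold, zero_add, PySem.Dict.values_eq_map_keys _ hUN 0, List.countP_map]
    rw [List.countP_congr (q := fun k => decide (∀ d ∈ v :: tl, k ∈ PySem.Set.ofList (List.map Prod.fst d))) ?_]
    · rw [List.countP_eq_length_filter]
    · intro k hk
      simp only [Function.comp_apply, hgetD, decide_eq_true_eq]
      rw [Int.natCast_inj, List.countP_eq_length]
      simp
  rw [hinterB, hsize]
  by_cases h0 : (List.foldl (fun c d => (PySem.Set.ofList (List.map Prod.fst d)).foldl (fun c k => c.insert k (c.getD k 0 + 1)) c) (PySem.Dict.empty : PySem.Dict String Int) (v :: tl)).keys.length = 0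
  · have hAu0 : (List.foldl PySem.Set.union (PySem.Set.ofList (List.map Prod.fst v)) (List.map (fun d => PySem.Set.ofList (List.map Prod.fst d)) tl)) = [] := by
      have hz : (List.foldl PySem.Set.union (PySem.Set.ofList (List.map Prod.fst v)) (List.map (fun d => PySem.Set.ofList (List.map Prod.fst d)) tl)).length = 0 := hlen.trans h0
      exact List.eq_nil_of_length_eq_zero hz
    have hk0 : (List.foldl (fun c d => (PySem.Set.ofList (List.map Prod.fst d)).foldl (fun c k => c.insert k (c.getD k 0 + 1)) c) (PySem.Dict.empty : PySem.Dict String Int) (v :: tl)).keys = [] := List.eq_nil_of_length_eq_zero h0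
    rw [hAu0]
    simp
    intro hcon
    exact absurd hk0 hcon
  · have hne : (List.foldl PySem.Set.union (PySem.Set.ofList (List.map Prod.fst v)) (List.map (fun d => PySem.Set.ofList (List.map Prod.fst d)) tl)) ≠ [] := by
      intro hnil
      apply h0
      rw [← hlen, hnil]
      rfl
    rw [if_neg (by simpa [List.isEmpty_iff] using hne), if_neg h0, hlenI, hlen, decide_eq_decide]
    omega

-- ===== VERDICT (by name: the statement is the Claim_ definition above) =====
theorem schemas_structurally_similar_py_spec : Claim_equal_schemas_structurally_similar_py := by
  intro vds _
  unfold Spec_schemas_structurally_similar_py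
  cases vds with
  | nil => rfl
  | cons v tl => exact schemas_cons_eq v tl
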